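-- pv_equiv track=rewrite | github.com/Mangul-Lab-USC/benchmarking_error_correction | scripts/evaluation/data_metrics.py | length
-- ===== SOURCE A (Python) =====
-- def length(list):
--     cover = []
--     for item in list:
--         if "50" in item:
--             cover.append("50L")
--         elif "75" in item:
--             cover.append("75L")
--         elif "100" in item:
--             cover.append("100L")
--         else:
--             cover.append("100")
--     return cover
-- ===== SOURCE B (Python) =====
-- # B: staged per-pattern overwrite passes over a preinitialized default array,
-- # lowest priority first, so later passes overwrite with higher-priority labels.
-- def length(list):
--     cover = ["100"] * len(list)
--     for pat, label in [("100", "100L"), ("75", "75L"), ("50", "50L")]: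
--         for i, item in enumerate(list):
--             if pat in item:
--                 cover[i] = label
--     return cover
-- ===== Notes on version B (the rewrite author's own statement) =====
-- stated objective: alternative
-- what changed: Instead of per-item first-match if-elif classification, B preinitializes the whole output to the default and makes three whole-list overwrite passes, one per pattern from lowest to highest priority, so the last pass that matches wins.
import Mathlib
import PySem

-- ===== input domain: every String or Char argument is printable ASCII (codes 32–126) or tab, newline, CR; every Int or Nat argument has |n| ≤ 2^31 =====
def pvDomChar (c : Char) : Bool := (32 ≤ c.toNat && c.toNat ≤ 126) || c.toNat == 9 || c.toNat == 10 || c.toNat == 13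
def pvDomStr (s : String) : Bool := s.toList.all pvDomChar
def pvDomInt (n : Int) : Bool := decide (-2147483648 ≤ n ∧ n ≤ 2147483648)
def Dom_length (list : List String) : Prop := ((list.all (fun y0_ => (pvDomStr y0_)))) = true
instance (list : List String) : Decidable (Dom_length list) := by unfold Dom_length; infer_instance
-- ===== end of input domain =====

-- B builds the output by staged per-pattern overwrite passes (lowest priority first) over a
-- preinitialized default array instead of a per-item if-elif chain; equivalent, not faster.

-- ===== PORT A =====
def length (list : List String) : List String :=
  list.foldl (fun cover item =>
    if PySem.Str.isIn "50" item then cover ++ ["50L"]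
    else if PySem.Str.isIn "75" item then cover ++ ["75L"]
    else if PySem.Str.isIn "100" item then cover ++ ["100L"]
    else cover ++ ["100"]) []

-- ===== PORT B =====
-- one overwrite pass: positions of `lst` containing `pat` get `label`, others keep `cover`'s entry
def overwritePass (lst cover : List String) (pat label : String) : List String :=
  (List.zip cover lst).map (fun ci => if PySem.Str.isIn pat ci.2 then label else ci.1)

def length_alt (list : List String) : List String :=
  [("100", "100L"), ("75", "75L"), ("50", "50L")].foldl
    (fun cover pl => overwritePass list cover pl.1 pl.2)
    (List.replicate list.length "100")

-- ===== PRECONDITION & SPEC =====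
def Spec_length (list : List String) (out : List String) : Prop := out = length_alt list
instance (list : List String) (out : List String) : Decidable (Spec_length list out) := by unfold Spec_length; infer_instance

-- ===== CLAIM (what is proved, stated in full; the proofs are below) =====
def Claim_equal_length : Prop := ∀ (list : List String), Dom_length list → Spec_length list (length list)

-- ===== LEMMAS AND PROOFS =====
theorem length_alt_cons (x : String) (xs : List String) :
    length_alt (x :: xs) =
      (if PySem.Str.isIn "50" x then "50L"
       else if PySem.Str.isIn "75" x then "75L"
       else if PySem.Str.isIn "100" x then "100L"
       else "100") :: length_alt xs := by
  simp only [length_alt, List.foldl, overwritePass, List.length_cons, List.replicate,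
    List.zip_cons_cons, List.map_cons]

-- ===== VERDICT (by name: the statement is the Claim_ definition above) =====
theorem length_spec : Claim_equal_length := by
  intro list hdom
  clear hdom
  unfold Spec_length length
  have step : ∀ (cover : List String) (item : String),
      (if PySem.Str.isIn "50" item then cover ++ ["50L"]
       else if PySem.Str.isIn "75" item then cover ++ ["75L"]
       else if PySem.Str.isIn "100" item then cover ++ ["100L"]
       else cover ++ ["100"]) =
      cover ++ [if PySem.Str.isIn "50" item then "50L"
       else if PySem.Str.isIn "75" item then "75L"
       else if PySem.Str.isIn "100" item then "100L"
       else "100"] := by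
    intro cover item; split_ifs <;> rfl
  simp only [step]
  rw [PySem.List.foldl_append_singleton_eq_map]
  induction list with
  | nil => rfl
  | cons x xs ih =>
      rw [List.map_cons, length_alt_cons, ← ih]
      split_ifs <;> rfl
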